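-- pv_equiv track=rewrite | github.com/Mewash1/algorithmsAndDataStructures | trees/BST.py | back_to_left
-- ===== SOURCE A (Python) =====
-- import copy
--
-- def back_to_left(padding: list):
--     padding_new = copy.deepcopy(padding)
--     padding.reverse()
--     for element in padding:
--         if '|' in element:
--             padding_new.pop()
--             break
--         else:
--             padding_new.pop()
--     return padding_new
-- ===== SOURCE B (Python) =====
-- def back_to_left(padding: list):
--     # One forward pass tracking the last index holding '|', then a single slice.
--     # Like A, this reverses `padding` in place (return value computed before).
--     cut = 0
--     for i, element in enumerate(padding):
--         if '|' in element:
--             cut = i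
--     result = padding[:cut]
--     padding.reverse()
--     return result
-- ===== Notes on version B (the rewrite author's own statement) =====
-- stated objective: simpler
-- what changed: Replaces deepcopy + reverse + pop-with-break loop over the reversed list by a single forward scan that records the last index containing '|' and one slice padding[:cut].
import Mathlib
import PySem

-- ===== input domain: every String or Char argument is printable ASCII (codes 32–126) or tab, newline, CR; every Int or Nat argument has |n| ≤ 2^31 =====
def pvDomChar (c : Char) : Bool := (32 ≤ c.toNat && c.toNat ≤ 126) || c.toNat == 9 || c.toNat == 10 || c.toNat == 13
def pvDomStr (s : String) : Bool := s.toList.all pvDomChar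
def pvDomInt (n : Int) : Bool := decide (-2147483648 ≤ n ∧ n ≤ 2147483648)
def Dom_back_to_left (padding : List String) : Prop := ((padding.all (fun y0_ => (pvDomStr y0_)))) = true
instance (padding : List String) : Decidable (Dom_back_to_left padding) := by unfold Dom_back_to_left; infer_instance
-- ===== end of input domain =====

-- B replaces A's deepcopy + reverse + pop-with-break loop by one forward scan recording the
-- last index containing '|' plus a single slice; like A it reverses `padding` in place (the
-- theorems here are about the return value only).


-- ===== PORT A =====
-- for element in padding(reversed): pop padding_new; break after popping the first '|' element.
-- (deepcopy is the identity on a list of immutable strings; list.pop() is dropLast.)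
def back_to_left_loop : List String → List String → List String
  | [], padding_new => padding_new
  | element :: rest, padding_new =>
    if PySem.Str.isIn "|" element then padding_new.dropLast
    else back_to_left_loop rest padding_new.dropLast

def back_to_left (padding : List String) : List String :=
  back_to_left_loop padding.reverse padding

-- ===== PORT B =====
-- forward scan: cut = last index whose element contains '|' (0 if none), then padding[:cut]
def back_to_left_alt (padding : List String) : List String :=
  let cut : Int := (PySem.List.enumerate padding 0).foldl
    (fun cut p => if PySem.Str.isIn "|" p.2 then p.1 else cut) 0
  PySem.List.slice padding none (some cut)

-- ===== PRECONDITION & SPEC =====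
def Spec_back_to_left (padding : List String) (out : List String) : Prop := out = back_to_left_alt padding
instance (padding : List String) (out : List String) : Decidable (Spec_back_to_left padding out) := by unfold Spec_back_to_left; infer_instance

-- ===== CLAIM (what is proved, stated in full; the proofs are below) =====
def Claim_equal_back_to_left : Prop := ∀ (padding : List String), Dom_back_to_left padding → Spec_back_to_left padding (back_to_left padding)

-- ===== LEMMAS AND PROOFS =====

-- the cut index computed by B, for reasoning
def pvCut (xs : List String) : Int :=
  (PySem.List.enumerate xs 0).foldl
    (fun cut p => if PySem.Str.isIn "|" p.2 then p.1 else cut) 0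

theorem pvCut_snoc (ys : List String) (e : String) :
    pvCut (ys ++ [e]) = if PySem.Str.isIn "|" e then (ys.length : Int) else pvCut ys := by
  simp [pvCut, PySem.List.enumerate_append, List.foldl_append, PySem.List.enumerate]

theorem pvCut_bounds (xs : List String) : 0 ≤ pvCut xs ∧ pvCut xs ≤ xs.length := by
  induction xs using List.reverseRecOn with
  | nil => simp [pvCut, PySem.List.enumerate]
  | append_singleton ys e ih =>
    rw [pvCut_snoc]
    split <;> simp <;> omega

theorem back_to_left_snoc (ys : List String) (e : String) :
    back_to_left (ys ++ [e]) =
      if PySem.Str.isIn "|" e then ys else back_to_left ys := by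
  simp [back_to_left, back_to_left_loop]

theorem back_to_left_alt_eq_take (xs : List String) :
    back_to_left_alt xs = xs.take (pvCut xs).toNat := by
  show PySem.List.slice xs none (some (pvCut xs)) = _
  exact PySem.List.slice_to _ (pvCut_bounds xs).1

theorem back_to_left_eq_alt (xs : List String) : back_to_left xs = back_to_left_alt xs := by
  induction xs using List.reverseRecOn with
  | nil => decide
  | append_singleton ys e ih =>
    rw [back_to_left_snoc, back_to_left_alt_eq_take, pvCut_snoc]
    by_cases hb : PySem.Chars.isIn ['|'] e.toList = true
    · simp [hb]
    · have hle := (pvCut_bounds ys).2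
      have h0 := (pvCut_bounds ys).1
      rw [if_neg (by simpa [PySem.Str.isIn] using hb), if_neg (by simpa [PySem.Str.isIn] using hb),
        List.take_append_of_le_length (by omega), ih, back_to_left_alt_eq_take]

-- ===== VERDICT (by name: the statement is the Claim_ definition above) =====
theorem back_to_left_spec : Claim_equal_back_to_left := by
  intro padding _
  exact back_to_left_eq_alt padding
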